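-- pv_equiv track=rewrite | github.com/etErn-A12l/Code-More | Code/Python/DCN/Parity.py | str_to_bin_with_parity
-- ===== SOURCE A (Python) =====
-- def str_to_bin_with_parity(string):
--     # converting string into binary
--     binary_string = ''.join(format(ord(i), '08b') for i in string)
--
--     # calculating parity bit
--     ones = binary_string.count('1')
--     if ones % 2 == 0:
--         parity_bit = '0'
--     else:
--         parity_bit = '1'
--
--     # appending the parity bit to binary string
--     data = binary_string + parity_bit
--
--     return data
-- ===== SOURCE B (Python) =====
-- def str_to_bin_with_parity(string):
--     # Bits by arithmetic shifts (no format()); parity bit computed without any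
--     # counting over the output: XOR-fold all character codes into one word and
--     # take its popcount parity (Kernighan's bit trick), since XOR preserves
--     # the parity of the total number of set bits.
--     out = []
--     x = 0
--     for c in string:
--         n = ord(c)
--         x ^= n
--         for k in (7, 6, 5, 4, 3, 2, 1, 0):
--             out.append('1' if (n >> k) & 1 else '0')
--     p = 0
--     while x:
--         p ^= 1
--         x &= x - 1
--     return ''.join(out) + str(p)
-- ===== Notes on version B (the rewrite author's own statement) =====
-- stated objective: alternative
-- what changed: B extracts bits with arithmetic shifts instead of format(), and derives the parity bit without counting '1's in the output at all: it XOR-folds all character codes into one word and takes that word's popcount parity via Kernighan's n&=n-1 trick, correct because XOR preserves the parity of the total number of set bits.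
import Mathlib
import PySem

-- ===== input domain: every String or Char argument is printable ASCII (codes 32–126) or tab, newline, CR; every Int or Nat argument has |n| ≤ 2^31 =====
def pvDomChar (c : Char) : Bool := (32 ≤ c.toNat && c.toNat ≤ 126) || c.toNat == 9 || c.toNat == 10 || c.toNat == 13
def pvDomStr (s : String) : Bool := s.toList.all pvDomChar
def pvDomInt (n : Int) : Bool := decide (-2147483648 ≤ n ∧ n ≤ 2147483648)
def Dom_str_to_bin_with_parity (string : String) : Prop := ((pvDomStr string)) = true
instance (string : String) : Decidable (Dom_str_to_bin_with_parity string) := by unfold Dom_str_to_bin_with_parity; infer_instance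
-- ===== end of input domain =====

-- B replaces format()+counting '1's by arithmetic bit shifts and a parity bit obtained
-- from the XOR-fold of all character codes (Kernighan popcount); same cost, different algorithm.

-- format(ord(c), '08b') ported by hand: exact for character codes 0..255
-- (Dom restricts codes to ≤ 126, so exactly 8 digits, as in Python).
def pvBit (m : Nat) : Char := if m % 2 == 1 then '1' else '0'

def pvFmt8 (n : Nat) : List Char :=
  [pvBit (n / 128), pvBit (n / 64), pvBit (n / 32), pvBit (n / 16),
   pvBit (n / 8), pvBit (n / 4), pvBit (n / 2), pvBit n]

-- ===== PORT A =====
def str_to_bin_with_parity (string : String) : String :=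
  let binary_string : List Char := string.toList.flatMap (fun c => pvFmt8 c.toNat)
  let ones : Nat := binary_string.count '1'
  let parity_bit : Char := if ones % 2 == 0 then '0' else '1'
  String.ofList (binary_string ++ [parity_bit])

-- ===== PORT B =====
-- Kernighan popcount-parity loop 'while x: p ^= 1; x &= x-1'; the fuel is the
-- initial x (the loop clears one set bit per step, so x steps always suffice)
def pvKern (fuel x p : Nat) : Nat :=
  match fuel with
  | 0 => p
  | f + 1 => if x = 0 then p else pvKern f (x &&& (x - 1)) (p ^^^ 1)

def str_to_bin_with_parity_alt (string : String) : String :=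
  let r : List Char × Nat := string.toList.foldl
    (fun (acc : List Char × Nat) c =>
      let n := c.toNat
      (([7, 6, 5, 4, 3, 2, 1, 0] : List Nat).foldl
        (fun o k => o ++ [if (n >>> k) &&& 1 ≠ 0 then '1' else '0']) acc.1,
       acc.2 ^^^ n))
    ([], 0)
  String.ofList r.1 ++ PySem.Int.toStr (pvKern r.2 r.2 0)

-- ===== PRECONDITION & SPEC =====
def Spec_str_to_bin_with_parity (string : String) (out : String) : Prop := out = str_to_bin_with_parity_alt string
instance (string : String) (out : String) : Decidable (Spec_str_to_bin_with_parity string out) := by unfold Spec_str_to_bin_with_parity; infer_instance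

-- ===== CLAIM (what is proved, stated in full; the proofs are below) =====
def Claim_equal_str_to_bin_with_parity : Prop := ∀ (string : String), Dom_str_to_bin_with_parity string → Spec_str_to_bin_with_parity string (str_to_bin_with_parity string)

-- ===== LEMMAS AND PROOFS =====

-- B's shift-and-mask bit equals A's division bit
lemma pvBitShift (n k : Nat) :
    (if (n >>> k) &&& 1 ≠ 0 then '1' else '0') = pvBit (n / 2 ^ k) := by
  rw [Nat.shiftRight_eq_div_pow, Nat.and_one_is_mod, pvBit]
  rcases Nat.mod_two_eq_zero_or_one (n / 2 ^ k) with h | h <;> simp [h]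

-- B's inner loop produces exactly A's 8-bit chunk
lemma pvChunk (n : Nat) (o : List Char) :
    ([7, 6, 5, 4, 3, 2, 1, 0] : List Nat).foldl
      (fun o k => o ++ [if (n >>> k) &&& 1 ≠ 0 then '1' else '0']) o
    = o ++ pvFmt8 n := by
  have h : ∀ k : Nat, (if (n >>> k) &&& 1 ≠ 0 then '1' else '0') = pvBit (n / 2 ^ k) :=
    pvBitShift n
  simp only [List.foldl_cons, List.foldl_nil]
  rw [h 7, h 6, h 5, h 4, h 3, h 2, h 1, h 0]
  simp only [pvFmt8, List.append_assoc]
  norm_num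

-- the '1'-count of a chunk, as a sum of bits
lemma pvCount8 (n : Nat) :
    (pvFmt8 n).count '1' =
      n / 128 % 2 + n / 64 % 2 + n / 32 % 2 + n / 16 % 2 +
      n / 8 % 2 + n / 4 % 2 + n / 2 % 2 + n % 2 := by
  have hb : ∀ m : Nat, List.count '1' [pvBit m] = m % 2 := by
    intro m; rw [pvBit]
    rcases Nat.mod_two_eq_zero_or_one m with h | h <;> simp [h]
  show List.count '1' _ = _
  rw [show (pvFmt8 n) = [pvBit (n/128)] ++ [pvBit (n/64)] ++ [pvBit (n/32)] ++ [pvBit (n/16)]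
        ++ [pvBit (n/8)] ++ [pvBit (n/4)] ++ [pvBit (n/2)] ++ [pvBit n] from rfl]
  simp only [List.count_append, hb]

-- parity of a sum of 8 bit-pairs, abstractly (discharged once by omega)
lemma pvParityAdd8 (x7 x6 x5 x4 x3 x2 x1 x0 y7 y6 y5 y4 y3 y2 y1 y0
    z7 z6 z5 z4 z3 z2 z1 z0 : Nat)
    (h7 : z7 = (x7 + y7) % 2) (h6 : z6 = (x6 + y6) % 2) (h5 : z5 = (x5 + y5) % 2)
    (h4 : z4 = (x4 + y4) % 2) (h3 : z3 = (x3 + y3) % 2) (h2 : z2 = (x2 + y2) % 2)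
    (h1 : z1 = (x1 + y1) % 2) (h0 : z0 = (x0 + y0) % 2) :
    (z7 + z6 + z5 + z4 + z3 + z2 + z1 + z0) % 2 =
      ((x7 + x6 + x5 + x4 + x3 + x2 + x1 + x0) +
       (y7 + y6 + y5 + y4 + y3 + y2 + y1 + y0)) % 2 := by
  omega

-- XOR preserves the parity of the total bit count
lemma pvXorParity (a b : Nat) :
    (pvFmt8 (a ^^^ b)).count '1' % 2 =
      ((pvFmt8 a).count '1' + (pvFmt8 b).count '1') % 2 := by
  have key : ∀ m k : Nat, m = 2 ^ k →
      (a ^^^ b) / m % 2 = (a / m % 2 + b / m % 2) % 2 := by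
    rintro m k rfl
    rw [← Nat.shiftRight_eq_div_pow, ← Nat.shiftRight_eq_div_pow, ← Nat.shiftRight_eq_div_pow,
        Nat.shiftRight_xor_distrib, Nat.xor_mod_two_eq]
    omega
  have h0 : (a ^^^ b) % 2 = (a % 2 + b % 2) % 2 := by
    rw [Nat.xor_mod_two_eq]; omega
  simp only [pvCount8]
  exact pvParityAdd8 _ _ _ _ _ _ _ _ _ _ _ _ _ _ _ _ _ _ _ _ _ _ _ _
    (key 128 7 (by norm_num)) (key 64 6 (by norm_num)) (key 32 5 (by norm_num))
    (key 16 4 (by norm_num)) (key 8 3 (by norm_num)) (key 4 2 (by norm_num))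
    (key 2 1 (by norm_num)) h0

-- Kernighan's loop computes the popcount parity of an 8-bit word
set_option maxRecDepth 40000 in
lemma pvKernEq : ∀ x < 128, pvKern x x 0 = (pvFmt8 x).count '1' % 2 := by decide

-- B's outer fold with the step function in simplified form
lemma pvFoldBclean (l : List Char) (acc : List Char) (x : Nat) :
    l.foldl (fun (acc : List Char × Nat) c => (acc.1 ++ pvFmt8 c.toNat, acc.2 ^^^ c.toNat)) (acc, x)
      = (acc ++ l.flatMap (fun c => pvFmt8 c.toNat),
         l.foldl (fun a c => a ^^^ c.toNat) x) := by
  induction l generalizing acc x with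
  | nil => simp
  | cons c t ih =>
      simp only [List.foldl_cons, List.flatMap_cons]
      rw [ih, List.append_assoc]

-- B's outer fold: accumulated chunks and XOR of codes
lemma pvFoldB (l : List Char) (acc : List Char) (x : Nat) :
    l.foldl (fun (acc : List Char × Nat) c =>
        let n := c.toNat
        (([7, 6, 5, 4, 3, 2, 1, 0] : List Nat).foldl
          (fun o k => o ++ [if (n >>> k) &&& 1 ≠ 0 then '1' else '0']) acc.1,
         acc.2 ^^^ n)) (acc, x)
      = (acc ++ l.flatMap (fun c => pvFmt8 c.toNat),
         l.foldl (fun a c => a ^^^ c.toNat) x) := by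
  have hf : (fun (acc : List Char × Nat) (c : Char) =>
        let n := c.toNat
        (([7, 6, 5, 4, 3, 2, 1, 0] : List Nat).foldl
          (fun o k => o ++ [if (n >>> k) &&& 1 ≠ 0 then '1' else '0']) acc.1,
         acc.2 ^^^ n))
      = (fun (acc : List Char × Nat) (c : Char) => (acc.1 ++ pvFmt8 c.toNat, acc.2 ^^^ c.toNat)) := by
    funext acc c
    simp only [pvChunk]
  rw [hf, pvFoldBclean]

-- the XOR-fold's popcount parity equals the parity of the '1'-count of all chunks
lemma pvXorFoldParity : ∀ (l : List Char), (∀ c ∈ l, c.toNat < 128) → ∀ x : Nat, x < 128 →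
    pvKern (l.foldl (fun a c => a ^^^ c.toNat) x) (l.foldl (fun a c => a ^^^ c.toNat) x) 0 =
      ((pvFmt8 x).count '1' + (l.flatMap (fun c => pvFmt8 c.toNat)).count '1') % 2 := by
  intro l
  induction l with
  | nil => intro _ x hx; simpa using pvKernEq x hx
  | cons c t ih =>
      intro hmem x hx
      have hc : c.toNat < 128 := hmem c (by simp)
      have hx' : x ^^^ c.toNat < 128 := Nat.xor_lt_two_pow (n := 7) hx hc
      simp only [List.foldl_cons, List.flatMap_cons, List.count_append]
      rw [ih (fun d hd => hmem d (by simp [hd])) _ hx']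
      have := pvXorParity x c.toNat
      omega

theorem str_to_bin_with_parity_spec : Claim_equal_str_to_bin_with_parity := by
  intro s hdom
  unfold Spec_str_to_bin_with_parity str_to_bin_with_parity str_to_bin_with_parity_alt
  rw [pvFoldB]
  have hmem : ∀ c ∈ s.toList, c.toNat < 128 := by
    intro c hc
    have := List.all_eq_true.mp hdom c hc
    simp [pvDomChar] at this
    omega
  simp only [List.nil_append]
  rw [pvXorFoldParity s.toList hmem 0 (by norm_num)]
  have hz : (pvFmt8 0).count '1' = 0 := by decide
  rw [hz, Nat.zero_add]
  rcases Nat.mod_two_eq_zero_or_one ((s.toList.flatMap (fun c => pvFmt8 c.toNat)).count '1') with h | h <;>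
    rw [h] <;> simp <;> decide
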